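-- pv_equiv track=rewrite | github.com/oVirt/vdsm | vdsm_hooks/ethtool_options/ethtool_options.py | _parse_into_subcommands
-- ===== SOURCE A (Python) =====
-- from collections import namedtuple
--
-- Subcommand = namedtuple('Subcommand', ('name', 'device', 'flags'))
--
-- def _parse_into_subcommands(tokens):
--     current = []
--     for token in tokens:
--         if token.startswith('-') and current:
--             yield Subcommand(current[0], current[1], current[2:])
--             current = []
--         current.append(token)
--     if current:
--         yield Subcommand(current[0], current[1], current[2:])
-- ===== SOURCE B (Python) =====
-- from collections import namedtuple
--
-- Subcommand = namedtuple('Subcommand', ('name', 'device', 'flags'))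
--
-- def _parse_into_subcommands(tokens):
--     toks = list(tokens)
--     if not toks:
--         return
--     bounds = [0] + [i for i in range(1, len(toks))
--                     if toks[i].startswith('-')] + [len(toks)]
--     for start, end in zip(bounds, bounds[1:]):
--         group = toks[start:end]
--         yield Subcommand(group[0], group[1], group[2:])
-- ===== Notes on version B (the rewrite author's own statement) =====
-- stated objective: alternative
-- what changed: B materializes the tokens, precomputes all group-boundary indices in one comprehension and slices each group out of the list, instead of A's token-by-token accumulator loop.
import Mathlib
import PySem

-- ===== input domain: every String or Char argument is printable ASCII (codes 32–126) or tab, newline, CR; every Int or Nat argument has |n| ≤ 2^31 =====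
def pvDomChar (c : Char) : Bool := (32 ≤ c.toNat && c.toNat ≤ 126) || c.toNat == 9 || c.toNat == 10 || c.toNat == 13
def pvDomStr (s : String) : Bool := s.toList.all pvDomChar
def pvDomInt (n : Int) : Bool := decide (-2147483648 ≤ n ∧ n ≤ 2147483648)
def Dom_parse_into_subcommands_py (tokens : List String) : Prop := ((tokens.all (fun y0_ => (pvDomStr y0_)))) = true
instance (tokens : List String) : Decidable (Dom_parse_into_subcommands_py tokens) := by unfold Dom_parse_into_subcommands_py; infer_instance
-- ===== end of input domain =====

-- B replaces A's token-by-token accumulator loop by precomputed boundary indices plus slicing (alternative decomposition, same cost).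


-- ===== PORT A =====
-- yield Subcommand(current[0], current[1], current[2:]); the [c] / [] cases are unreachable under Pre_ (Python raises IndexError there)
def pvFlushA (current : List String) : String × String × List String :=
  match current with
  | a :: b :: rest => (a, b, rest)
  | [a] => (a, "", [])
  | [] => ("", "", [])

def pvLoopA (current : List String) : List String → List (String × String × List String)
  | [] => if current = [] then [] else [pvFlushA current]
  | t :: ts =>
    if PySem.Str.startswith t "-" && !current.isEmpty then
      pvFlushA current :: pvLoopA [t] ts
    else
      pvLoopA (current ++ [t]) ts

def parse_into_subcommands_py (tokens : List String) : List (String × String × List String) :=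
  pvLoopA [] tokens

-- ===== PORT B =====
-- Subcommand(group[0], group[1], group[2:]); the [a] / [] cases are unreachable under Pre_ (Python raises IndexError there)
def pvFlushB (group : List String) : String × String × List String :=
  match group with
  | a :: b :: rest => (a, b, rest)
  | [a] => (a, "", [])
  | [] => ("", "", [])

def parse_into_subcommands_py_alt (tokens : List String) : List (String × String × List String) :=
  if tokens = [] then []
  else
    let n : Int := PySem.List.len tokens
    let bounds : List Int :=
      0 :: ((PySem.List.pyRange 1 n 1).filter
              (fun i => PySem.Str.startswith (PySem.List.pyGetD tokens i "") "-")) ++ [n]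
    (bounds.zip bounds.tail).map
      (fun se => pvFlushB (PySem.List.slice tokens (some se.1) (some se.2)))

-- ===== PRECONDITION & SPEC =====
-- Pre_ excludes exactly the inputs on which the Python raises IndexError: some subcommand group
-- (a maximal run starting at index 0 or at a token beginning with '-') has fewer than 2 tokens.
def Pre_parse_into_subcommands_py (tokens : List String) : Prop :=
  tokens = [] ∨
    ∀ i : Nat, i < tokens.length →
      (i = 0 ∨ PySem.Str.startswith (tokens.getD i "") "-" = true) →
      i + 1 < tokens.length ∧ PySem.Str.startswith (tokens.getD (i + 1) "") "-" = false

instance (tokens : List String) : Decidable (Pre_parse_into_subcommands_py tokens) := by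
  unfold Pre_parse_into_subcommands_py; infer_instance

def pvWitness_parse_into_subcommands_py : List String := ["-K", "eth0", "rx", "off", "-C", "eth1"]

def Spec_parse_into_subcommands_py (tokens : List String) (out : List (String × String × List String)) : Prop := out = parse_into_subcommands_py_alt tokens
instance (tokens : List String) (out : List (String × String × List String)) : Decidable (Spec_parse_into_subcommands_py tokens out) := by unfold Spec_parse_into_subcommands_py; infer_instance

-- ===== CLAIM (what is proved, stated in full; the proofs are below) =====
def Claim_equal_parse_into_subcommands_py : Prop := ∀ (tokens : List String), Dom_parse_into_subcommands_py tokens → Pre_parse_into_subcommands_py tokens → Spec_parse_into_subcommands_py tokens (parse_into_subcommands_py tokens)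

-- ===== LEMMAS AND PROOFS =====

-- the common grouping both programs compute: split at tokens starting with '-'
def pvSplitAux (acc : List String) : List String → List (List String)
  | [] => if acc = [] then [] else [acc]
  | t :: ts =>
    if PySem.Str.startswith t "-" && !acc.isEmpty then
      acc :: pvSplitAux [t] ts
    else
      pvSplitAux (acc ++ [t]) ts

-- inner boundary marks of a tail list (positions whose token starts with '-')
def pvMarks (ts : List String) : List Nat :=
  (List.range ts.length).filter (fun j => PySem.Str.startswith (ts.getD j "") "-")

-- chunk a list at (relative) cut positions
def pvChunks (xs : List String) (ms : List Nat) : List (List String) :=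
  match ms with
  | [] => [xs]
  | m :: mrest => xs.take m :: pvChunks (xs.drop m) (mrest.map (· - m))
termination_by ms.length
decreasing_by simp

lemma pvChunks_nil (xs : List String) : pvChunks xs [] = [xs] := by
  rw [pvChunks]

lemma pvChunks_cons (xs : List String) (m : Nat) (ms : List Nat) :
    pvChunks xs (m :: ms) = xs.take m :: pvChunks (xs.drop m) (ms.map (· - m)) := by
  rw [pvChunks]

lemma pvLoopA_eq_map (ts : List String) :
    ∀ acc, pvLoopA acc ts = (pvSplitAux acc ts).map pvFlushA := by
  induction ts with
  | nil => intro acc; by_cases h : acc = [] <;> simp [pvLoopA, pvSplitAux, h]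
  | cons t ts ih =>
      intro acc
      simp only [pvLoopA, pvSplitAux]
      split <;> simp [ih]

lemma pvMarks_nil : pvMarks [] = [] := rfl

lemma pvMarks_cons (u : String) (us : List String) :
    pvMarks (u :: us) =
      (if PySem.Str.startswith u "-" then [0] else []) ++ (pvMarks us).map (· + 1) := by
  unfold pvMarks
  simp only [List.length_cons]
  rw [List.range_succ_eq_map, List.filter_cons, List.filter_map,
    show (Nat.succ : Nat → Nat) = (fun x : Nat => x + 1) from rfl]
  split_ifs <;> simp_all [Function.comp_def]

lemma pvChunks_eq_splitAux :
    ∀ (us acc : List String), acc ≠ [] →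
      pvChunks (acc ++ us) ((pvMarks us).map (· + acc.length)) = pvSplitAux acc us := by
  intro us
  induction us with
  | nil => intro acc h; simp [pvMarks_nil, pvChunks_nil, pvSplitAux, h]
  | cons u us ih =>
      intro acc h
      have hacc : (!acc.isEmpty) = true := by simpa [List.isEmpty_iff] using h
      rw [pvMarks_cons]
      unfold pvSplitAux
      by_cases hs : PySem.Str.startswith u "-" = true
      · simp only [hs, if_true, hacc, Bool.and_self, List.cons_append, List.map_append,
          List.map_cons, List.map_nil, List.map_map, Nat.zero_add]
        rw [pvChunks_cons]
        congr 1
        · simp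
        · rw [List.drop_left]
          simp only [List.nil_append]
          have h1 : ((pvMarks us).map ((· + acc.length) ∘ (· + 1))).map (· - acc.length)
              = (pvMarks us).map (· + 1) := by
            rw [List.map_map]
            apply List.map_congr_left
            intro x _
            simp [Function.comp]
          rw [h1]
          simpa using ih [u] (by simp)
      · have hs' : PySem.Str.startswith u "-" = false := by simpa using hs
        simp only [hs', Bool.false_eq_true, if_false, Bool.false_and, List.nil_append,
          List.map_map]
        have h3 : (pvMarks us).map ((· + acc.length) ∘ (· + 1))
            = (pvMarks us).map (· + (acc ++ [u]).length) := by
          apply List.map_congr_left; intro x _; simp [Function.comp]; omega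
        rw [h3, show acc ++ u :: us = (acc ++ [u]) ++ us by simp]
        exact ih (acc ++ [u]) (by simp)

lemma pvZip_slices_eq_chunks :
    ∀ (ms : List Nat) (xs : List String) (s : Nat),
      List.Pairwise (· ≤ ·) (s :: ms) →
      (List.zip (s :: (ms ++ [xs.length])) (ms ++ [xs.length])).map
          (fun p => (xs.drop p.1).take (p.2 - p.1))
        = pvChunks (xs.drop s) (ms.map (· - s)) := by
  intro ms
  induction ms with
  | nil =>
      intro xs s _
      simp only [List.nil_append, List.zip_cons_cons, List.zip_nil_right, List.map_cons,
        List.map_nil, pvChunks_nil]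
      congr 1
      exact List.take_of_length_le (by simp)
  | cons m ms ih =>
      intro xs s hpw
      have hsm : s ≤ m := (List.pairwise_cons.mp hpw).1 m (by simp)
      have hpw' : List.Pairwise (· ≤ ·) (m :: ms) := (List.pairwise_cons.mp hpw).2
      have hih := ih xs m hpw'
      simp only [List.map_cons, List.cons_append, List.zip_cons_cons] at hih ⊢
      rw [hih, pvChunks_cons]
      congr 1
      · congr 1
        · rw [List.drop_drop]; congr 1; omega
        · rw [List.map_map]
          apply List.map_congr_left
          intro x _
          simp [Function.comp]; omega

lemma pvAlt_eq_map (t : String) (ts : List String) :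
    parse_into_subcommands_py_alt (t :: ts) =
      (pvChunks (t :: ts) ((pvMarks ts).map (· + 1))).map pvFlushB := by
  unfold parse_into_subcommands_py_alt
  rw [if_neg (List.cons_ne_nil t ts)]
  simp only [PySem.List.len_eq]
  have hrange : PySem.List.pyRange 1 ((t :: ts).length : Int) 1
      = (List.range ts.length).map (fun k => ((k + 1 : Nat) : Int)) := by
    rw [PySem.List.pyRange_one]
    have h1 : (((t :: ts).length : Int) - 1).toNat = ts.length := by simp
    rw [h1]
    apply List.map_congr_left; intro k _; push_cast; ring
  rw [hrange, List.filter_map]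
  have hfil : (List.range ts.length).filter
        ((fun i => PySem.Str.startswith (PySem.List.pyGetD (t :: ts) i "") "-")
          ∘ (fun k => ((k + 1 : Nat) : Int)))
      = pvMarks ts := by
    unfold pvMarks
    apply List.filter_congr
    intro k _
    show PySem.Str.startswith (PySem.List.pyGetD (t :: ts) (((k + 1 : Nat) : Int)) "") "-"
        = PySem.Str.startswith (ts.getD k "") "-"
    rw [PySem.List.pyGetD_natCast]
    simp
  rw [hfil]
  have hb : (0 : Int) :: ((pvMarks ts).map (fun j => ((j + 1 : Nat) : Int)))
        ++ [((t :: ts).length : Int)]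
      = ((0 :: ((pvMarks ts).map (· + 1)) ++ [(t :: ts).length]).map (fun j : Nat => (j : Int))) := by
    simp [List.map_map, Function.comp]
  rw [hb]
  rw [← List.map_tail, List.zip_map, List.map_map]
  have hfun : ((fun se : Int × Int =>
        pvFlushB (PySem.List.slice (t :: ts) (some se.1) (some se.2)))
          ∘ Prod.map (fun j : Nat => (j : Int)) (fun j : Nat => (j : Int)))
      = pvFlushB ∘ (fun p : Nat × Nat => ((t :: ts).drop p.1).take (p.2 - p.1)) := by
    funext p
    simp [Function.comp, Prod.map, PySem.List.slice_natCast]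
  rw [hfun, ← List.map_map]
  have htail : (0 :: ((pvMarks ts).map (· + 1)) ++ [(t :: ts).length]).tail
      = (pvMarks ts).map (· + 1) ++ [(t :: ts).length] := by simp
  rw [htail]
  have hch : List.Pairwise (· ≤ ·) (0 :: (pvMarks ts).map (· + 1)) := by
    rw [List.pairwise_cons]
    refine ⟨fun b _ => Nat.zero_le b, ?_⟩
    have pm : (pvMarks ts).Pairwise (· < ·) := by
      unfold pvMarks
      exact (List.pairwise_lt_range).filter _
    have pm1 : ((pvMarks ts).map (· + 1)).Pairwise (· < ·) := by
      rw [List.pairwise_map]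
      exact pm.imp (by omega)
    exact pm1.imp le_of_lt
  have hz := pvZip_slices_eq_chunks ((pvMarks ts).map (· + 1)) (t :: ts) 0 hch
  rw [show (0 :: ((pvMarks ts).map (· + 1)) ++ [(t :: ts).length])
      = 0 :: (((pvMarks ts).map (· + 1)) ++ [(t :: ts).length]) by simp]
  rw [hz]
  simp only [List.drop_zero, Nat.sub_zero, List.map_id']

-- ===== VERDICT (by name: the statement is the Claim_ definition above) =====
theorem parse_into_subcommands_py_spec : Claim_equal_parse_into_subcommands_py := by
  intro tokens _ _
  unfold Spec_parse_into_subcommands_py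
  cases tokens with
  | nil => rfl
  | cons t ts =>
      rw [pvAlt_eq_map]
      have hB : pvChunks (t :: ts) ((pvMarks ts).map (· + 1)) = pvSplitAux [t] ts := by
        have := pvChunks_eq_splitAux ts [t] (by simp)
        simpa using this
      rw [hB]
      have hA : parse_into_subcommands_py (t :: ts) = pvLoopA [t] ts := by
        simp [parse_into_subcommands_py, pvLoopA]
      rw [hA, pvLoopA_eq_map]
      have hflush : pvFlushA = pvFlushB := by
        funext g; cases g with
        | nil => rfl
        | cons a r => cases r <;> rfl
      rw [hflush]
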